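-- pv_equiv track=rewrite | github.com/JakubSokol/pp1 | 09-Test2/p1_a.py | f
-- ===== SOURCE A (Python) =====
-- def f(player1,player2):
--     sum1=0
--     sum2=0
--     mydict={
--     "A":10,
--     "K":10,
--     "Q":10,
--     "J":10,
--     "T":10,
--     "2":2,
--     "3":3,
--     "4":4,
--     "5":5,
--     "6":6,
--     "7":7,
--     "8":8,
--     "9":9,}
--     for i in range(0,len(player1)):
--         sum1+=mydict[player1[i]]
--     for i in range(0,len(player2)):
--         sum2+=mydict[player2[i]]
--     if sum1>sum2:
--         return True
--     if sum1<=sum2: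
--         return False
-- ===== SOURCE B (Python) =====
-- def f(player1, player2):
--     # Build a frequency table per hand, then score distinct card types weighted
--     # by multiplicity; compare the two scores in one expression.
--     mydict = {"A": 10, "K": 10, "Q": 10, "J": 10, "T": 10,
--               "2": 2, "3": 3, "4": 4, "5": 5, "6": 6, "7": 7, "8": 8, "9": 9}
--
--     def score(cards):
--         freq = {}
--         for c in cards:
--             freq[c] = freq.get(c, 0) + 1
--         return sum(mydict[card] * n for card, n in freq.items())
--
--     return score(player1) > score(player2)
-- ===== Notes on version B (the rewrite author's own statement) =====
-- stated objective: alternative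
-- what changed: B builds a frequency table per hand and sums value*multiplicity over distinct card types, instead of A's one dictionary lookup and addition per card position, and returns the comparison as a single expression.
import Mathlib
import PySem

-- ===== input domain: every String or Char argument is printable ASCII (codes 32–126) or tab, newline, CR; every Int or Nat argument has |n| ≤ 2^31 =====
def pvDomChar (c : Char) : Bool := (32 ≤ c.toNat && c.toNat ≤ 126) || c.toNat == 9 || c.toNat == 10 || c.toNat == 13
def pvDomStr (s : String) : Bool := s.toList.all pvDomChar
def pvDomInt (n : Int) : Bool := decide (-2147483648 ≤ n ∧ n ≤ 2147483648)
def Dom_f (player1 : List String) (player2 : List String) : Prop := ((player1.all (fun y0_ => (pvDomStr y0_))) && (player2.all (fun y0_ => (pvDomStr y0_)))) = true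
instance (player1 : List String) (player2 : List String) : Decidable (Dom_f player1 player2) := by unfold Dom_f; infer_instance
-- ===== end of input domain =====

-- B scores each hand via a frequency table over distinct card types instead of A's
-- per-position index loop; alternative decomposition, same return value on Pre_.

-- ===== PORT A =====
def cardDict : PySem.Dict String Int :=
  PySem.Dict.ofList [("A", 10), ("K", 10), ("Q", 10), ("J", 10), ("T", 10),
                     ("2", 2), ("3", 3), ("4", 4), ("5", 5), ("6", 6),
                     ("7", 7), ("8", 8), ("9", 9)]

-- A: two index loops `for i in range(0, len(..)): sum += mydict[..[i]]`; the lookup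
-- raises KeyError on unknown cards (excluded by Pre_f; getD 0 is total there).
def f (player1 : List String) (player2 : List String) : Bool :=
  let sum1 : Int :=
    (PySem.List.pyRange 0 (player1.length : Int) 1).foldl
      (fun s i => s + cardDict.getD (PySem.List.pyGetD player1 i "") 0) 0
  let sum2 : Int :=
    (PySem.List.pyRange 0 (player2.length : Int) 1).foldl
      (fun s i => s + cardDict.getD (PySem.List.pyGetD player2 i "") 0) 0
  if sum1 > sum2 then true
  else false  -- the Python's second `if sum1<=sum2` always holds here

-- ===== PORT B =====
-- freq-table pass: freq[c] = freq.get(c,0)+1, then weighted sum over freq.items()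
def scoreAlt (cards : List String) : Int :=
  let freq : PySem.Dict String Int :=
    cards.foldl (fun d c => d.insert c (d.getD c 0 + 1)) PySem.Dict.empty
  freq.items.foldl (fun s p => s + cardDict.getD p.1 0 * p.2) 0

def f_alt (player1 : List String) (player2 : List String) : Bool :=
  decide (scoreAlt player1 > scoreAlt player2)

-- ===== PRECONDITION & SPEC =====
-- Pre_f: every card is one of the 13 known keys; on any other card A raises KeyError.
def Pre_f (player1 : List String) (player2 : List String) : Prop :=
  (∀ s ∈ player1, s ∈ cardDict.keys) ∧ (∀ s ∈ player2, s ∈ cardDict.keys)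
instance (player1 : List String) (player2 : List String) : Decidable (Pre_f player1 player2) := by unfold Pre_f; infer_instance

def pvWitness_f : List String × List String := (["A", "7", "7"], ["K", "2"])

def Spec_f (player1 : List String) (player2 : List String) (out : Bool) : Prop := out = f_alt player1 player2
instance (player1 : List String) (player2 : List String) (out : Bool) : Decidable (Spec_f player1 player2 out) := by unfold Spec_f; infer_instance

-- ===== CLAIM (what is proved, stated in full; the proofs are below) =====
def Claim_equal_f : Prop := ∀ (player1 : List String) (player2 : List String), Dom_f player1 player2 → Pre_f player1 player2 → Spec_f player1 player2 (f player1 player2)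

-- ===== LEMMAS AND PROOFS =====

-- B's score: counter items → weighted sum over the deduped card list
theorem scoreAlt_eq_dedup_sum (cards : List String) :
    scoreAlt cards =
      ((PySem.List.dedup cards).map
        (fun k => cardDict.getD k 0 * (cards.count k : Int))).sum := by
  show (List.foldl (fun s p => s + cardDict.getD p.1 0 * p.2) 0
      (cards.foldl (fun d c => d.insert c (d.getD c 0 + 1)) PySem.Dict.empty).items) = _
  rw [PySem.Dict.foldl_insert_getD_add_one_eq_counter, PySem.Dict.items_counter,
    PySem.List.foldl_add ((PySem.Set.ofList cards).map (fun k => (k, (cards.count k : Int)))) (fun p => cardDict.getD p.1 0 * p.2) 0]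
  simp [List.map_map, Function.comp_def]

-- the deduped weighted sum is the plain per-card sum
theorem dedup_weighted_sum (cards : List String) (v : String → Int) :
    ((PySem.List.dedup cards).map (fun k => v k * (cards.count k : Int))).sum =
      (cards.map v).sum := by
  have hnd := PySem.List.nodup_dedup cards
  have hfin : (PySem.List.dedup cards).toFinset = cards.toFinset := by
    ext x; simp
  calc ((PySem.List.dedup cards).map (fun k => v k * (cards.count k : Int))).sum
      = ∑ k ∈ (PySem.List.dedup cards).toFinset, v k * (cards.count k : Int) := by
        rw [List.sum_toFinset _ hnd]
    _ = ∑ k ∈ cards.toFinset, cards.count k • v k := by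
        rw [hfin]; refine Finset.sum_congr rfl (fun k _ => ?_)
        rw [nsmul_eq_mul]; ring
    _ = (cards.map v).sum := (Finset.sum_list_map_count cards v).symm

theorem scoreAlt_eq (cards : List String) :
    scoreAlt cards = (cards.map (fun k => cardDict.getD k 0)).sum := by
  rw [scoreAlt_eq_dedup_sum, dedup_weighted_sum]

-- A's index loop is the same per-card sum
theorem sumA_eq (cards : List String) :
    (PySem.List.pyRange 0 (cards.length : Int) 1).foldl
        (fun s i => s + cardDict.getD (PySem.List.pyGetD cards i "") 0) 0 =
      (cards.map (fun k => cardDict.getD k 0)).sum := by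
  rw [PySem.List.foldl_pyRange_zero_pyGetD' cards ""
        (fun s x => s + cardDict.getD x 0) 0,
      PySem.List.foldl_add cards (fun x => cardDict.getD x 0) 0]
  simp

-- ===== VERDICT (by name: the statement is the Claim_ definition above) =====
theorem f_spec : Claim_equal_f := by
  intro player1 player2 _ _
  unfold Spec_f f f_alt
  rw [sumA_eq, sumA_eq, scoreAlt_eq, scoreAlt_eq]
  by_cases h : (player1.map (fun k => cardDict.getD k 0)).sum >
      (player2.map (fun k => cardDict.getD k 0)).sum <;> simp [h]
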